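-- pv_equiv track=rewrite | github.com/genomicsengland/workflow_pc_hooks | pre_commit_hooks/remove_consecutive_blank_lines.py | detect_consecutive_blank_lines
-- ===== SOURCE A (Python) =====
-- def detect_consecutive_blank_lines(contents: list) -> tuple[int, list]:
--     """
--     returns non-zero if the src contains consecutive blank lines
--     """
--
--     retv = 0
--     n_consecutive_blank_lines = 0
--     error_line_nums = []
--
--     for i, l in enumerate(contents):
--
--         if not l.strip():
--             n_consecutive_blank_lines += 1
--
--             if n_consecutive_blank_lines >= 2:
--                 retv = 1
--                 error_line_nums.append(i)
--
--         else:
--             n_consecutive_blank_lines = 0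
--
--     return retv, error_line_nums
-- ===== SOURCE B (Python) =====
-- def detect_consecutive_blank_lines(contents: list) -> tuple[int, list]:
--     """
--     returns non-zero if the src contains consecutive blank lines
--     """
--     blanks = [not l.strip() for l in contents]
--     error_line_nums = [i for i, (prev, cur) in enumerate(zip(blanks, blanks[1:]), start=1)
--                        if prev and cur]
--     return (1 if error_line_nums else 0), error_line_nums
-- ===== Notes on version B (the rewrite author's own statement) =====
-- stated objective: simpler
-- what changed: Replaces the stateful running-counter scan with a two-phase decomposition: build a blank-line mask in one pass, then collect indices of adjacent blank pairs via zip, deriving the return code from the collected list instead of threading it through the loop.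
import Mathlib
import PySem

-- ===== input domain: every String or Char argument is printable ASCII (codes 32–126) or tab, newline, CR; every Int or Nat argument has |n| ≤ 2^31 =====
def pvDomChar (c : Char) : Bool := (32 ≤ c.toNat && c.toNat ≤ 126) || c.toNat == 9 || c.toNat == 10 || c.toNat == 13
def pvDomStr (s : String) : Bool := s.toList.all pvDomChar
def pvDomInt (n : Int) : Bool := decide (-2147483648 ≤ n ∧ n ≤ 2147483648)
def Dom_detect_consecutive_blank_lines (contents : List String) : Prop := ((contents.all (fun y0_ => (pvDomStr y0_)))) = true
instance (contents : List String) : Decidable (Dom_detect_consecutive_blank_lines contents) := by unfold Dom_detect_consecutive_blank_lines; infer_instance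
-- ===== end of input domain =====

-- B replaces A's stateful running-counter scan by a blank-mask pass followed by an
-- adjacent-pair scan (simpler decomposition; same cost). Return value only, no mutation.

-- ===== PORT A =====
-- the loop of A over enumerate(contents), state (retv, n_consecutive_blank_lines, error_line_nums)
def pvALoop : List (Int × String) → Int → Int → List Int → Int × List Int
  | [], retv, _, errs => (retv, errs)
  | (i, l) :: rest, retv, cnt, errs =>
    if PySem.Str.strip l = "" then
      let cnt' := cnt + 1
      if cnt' ≥ 2 then pvALoop rest 1 cnt' (errs ++ [i])
      else pvALoop rest retv cnt' errs
    else pvALoop rest retv 0 errs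

def detect_consecutive_blank_lines (contents : List String) : Int × List Int :=
  pvALoop (PySem.List.enumerate contents 0) 0 0 []

-- ===== PORT B =====
-- the list comprehension of B: enumerate(zip(blanks, blanks[1:]), start=1) with filter
def pvBScan : List (Bool × Bool) → Int → List Int
  | [], _ => []
  | (prev, cur) :: rest, i =>
    if prev && cur then i :: pvBScan rest (i + 1) else pvBScan rest (i + 1)

def detect_consecutive_blank_lines_alt (contents : List String) : Int × List Int :=
  let blanks := contents.map (fun l => decide (PySem.Str.strip l = ""))
  let errs := pvBScan (blanks.zip (blanks.drop 1)) 1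
  ((if errs.isEmpty then 0 else 1), errs)

-- ===== PRECONDITION & SPEC =====
def Spec_detect_consecutive_blank_lines (contents : List String) (out : Int × List Int) : Prop := out = detect_consecutive_blank_lines_alt contents
instance (contents : List String) (out : Int × List Int) : Decidable (Spec_detect_consecutive_blank_lines contents out) := by unfold Spec_detect_consecutive_blank_lines; infer_instance

-- ===== CLAIM (what is proved, stated in full; the proofs are below) =====
def Claim_equal_detect_consecutive_blank_lines : Prop := ∀ (contents : List String), Dom_detect_consecutive_blank_lines contents → Spec_detect_consecutive_blank_lines contents (detect_consecutive_blank_lines contents)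

-- ===== LEMMAS AND PROOFS =====

-- reference scan: indices (from i) of lines that are blank and whose predecessor-flag is set
def pvT : List String → Bool → Int → List Int
  | [], _, _ => []
  | l :: rest, prev, i =>
    (if decide (PySem.Str.strip l = "") && prev then [i] else [])
      ++ pvT rest (decide (PySem.Str.strip l = "")) (i + 1)

theorem pvALoop_eq (rest : List String) : ∀ (i : Int) (retv cnt : Int) (errs : List Int),
    0 ≤ cnt →
    pvALoop (PySem.List.enumerate rest i) retv cnt errs =
      ((if pvT rest (decide (1 ≤ cnt)) i = [] then retv else 1),
        errs ++ pvT rest (decide (1 ≤ cnt)) i) := by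
  induction rest with
  | nil => intro i retv cnt errs _; simp [PySem.List.enumerate_nil, pvALoop, pvT]
  | cons l rest ih =>
    intro i retv cnt errs hcnt
    rw [PySem.List.enumerate_cons]
    by_cases hb : PySem.Str.strip l = ""
    · by_cases h1 : 1 ≤ cnt
      · have h2 : cnt + 1 ≥ 2 := by omega
        simp only [pvALoop, if_pos hb, if_pos h2]
        rw [ih (i + 1) 1 (cnt + 1) (errs ++ [i]) (by omega)]
        simp [pvT, hb, h1, hcnt]
      · have h2 : ¬ (cnt + 1 ≥ 2) := by omega
        simp only [pvALoop, if_pos hb, if_neg h2]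
        rw [ih (i + 1) retv (cnt + 1) errs (by omega)]
        simp [pvT, hb, h1, hcnt]
    · simp only [pvALoop, if_neg hb]
      rw [ih (i + 1) retv 0 errs (by omega)]
      simp [pvT, hb]

theorem pvBScan_eq (rest : List String) : ∀ (prev : Bool) (i : Int),
    pvBScan (((prev :: rest.map (fun l => decide (PySem.Str.strip l = ""))).zip
      (rest.map (fun l => decide (PySem.Str.strip l = "")))) ) i = pvT rest prev i := by
  induction rest with
  | nil => intro prev i; simp [pvBScan, pvT]
  | cons l rest ih =>
    intro prev i
    simp only [List.map_cons, List.zip_cons_cons, pvBScan, pvT]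
    rw [ih]
    by_cases h : (prev && decide (PySem.Str.strip l = "")) = true
    · have h' : (decide (PySem.Str.strip l = "") && prev) = true := by
        rw [Bool.and_comm]; exact h
      simp [h, h']
    · have h' : ¬ (decide (PySem.Str.strip l = "") && prev) = true := by
        rw [Bool.and_comm]; exact h
      simp [h, h']

-- ===== VERDICT (by name: the statement is the Claim_ definition above) =====
theorem detect_consecutive_blank_lines_spec : Claim_equal_detect_consecutive_blank_lines := by
  intro contents _
  unfold Spec_detect_consecutive_blank_lines detect_consecutive_blank_lines detect_consecutive_blank_lines_alt
  rw [pvALoop_eq contents 0 0 0 [] le_rfl]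
  cases contents with
  | nil => simp [pvT, pvBScan]
  | cons l rest =>
    simp only [List.map_cons, List.drop_succ_cons, List.drop_zero]
    have hB := pvBScan_eq rest (decide (PySem.Str.strip l = "")) 1
    simp only [hB]
    have : pvT (l :: rest) (decide ((1:Int) ≤ 0)) 0
        = pvT rest (decide (PySem.Str.strip l = "")) 1 := by
      simp [pvT]
    simp only [this, List.nil_append, List.isEmpty_iff]
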